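-- pv_equiv track=rewrite | github.com/jhonathaann/Uri_Beecrowd | Grafos/1194.py | encontra_posfixa
-- ===== SOURCE A (Python) =====
-- def encontra_posfixa(prefixa, infixa):
--     if not prefixa: return ""
--
--     # raiz é sempre o primeiro elemento da prefixa
--     raiz = prefixa[0]
--
--     # encontrando o indice da raiz na infixa pra quebra ela exatamente nesse ponto
--     indice_raiz = infixa.find(raiz)
--
--     in_esquerda = infixa[:indice_raiz]
--     in_direita = infixa[indice_raiz + 1:]
--
--     # divindo a prefixa para saber quais letras pertencem a cada lado
--     # o tamanho da parte esquerda da prefixa deve ser igual ao tamanho do lado esq da infixa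
--     tam_esq = len(in_esquerda)
--
--     # a raiz a gente ja tem por isso começa do 1. como tem q ter o mesmo tamanho, e esta começando do 1, colocamos tam_esq+1
--     pre_esquerda = prefixa[1: tam_esq +1 ]
--     pre_direita = prefixa[tam_esq + 1 : ]
--
--     # montamos a posfixa recursivamente
--     return encontra_posfixa(pre_esquerda, in_esquerda) + encontra_posfixa(pre_direita, in_direita) + raiz
-- ===== SOURCE B (Python) =====
-- def encontra_posfixa(prefixa, infixa):
--     # iterative: explicit stack, emit roots in reverse-postorder, reverse once at the end
--     out = []
--     stack = [(prefixa, infixa)]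
--     while stack:
--         pre, ino = stack.pop()
--         if not pre:
--             continue
--         raiz = pre[0]
--         i = ino.find(raiz)
--         in_esq = ino[:i]
--         in_dir = ino[i + 1:]
--         t = len(in_esq)
--         stack.append((pre[1:t + 1], in_esq))
--         stack.append((pre[t + 1:], in_dir))
--         out.append(raiz)
--     return ''.join(reversed(out))
-- ===== Notes on version B (the rewrite author's own statement) =====
-- stated objective: alternative
-- what changed: Recursion replaced by an explicit work stack that emits roots in reverse-postorder and reverses the collected characters once at the end, avoiding A's recursive string concatenation at every node.
import Mathlib
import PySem

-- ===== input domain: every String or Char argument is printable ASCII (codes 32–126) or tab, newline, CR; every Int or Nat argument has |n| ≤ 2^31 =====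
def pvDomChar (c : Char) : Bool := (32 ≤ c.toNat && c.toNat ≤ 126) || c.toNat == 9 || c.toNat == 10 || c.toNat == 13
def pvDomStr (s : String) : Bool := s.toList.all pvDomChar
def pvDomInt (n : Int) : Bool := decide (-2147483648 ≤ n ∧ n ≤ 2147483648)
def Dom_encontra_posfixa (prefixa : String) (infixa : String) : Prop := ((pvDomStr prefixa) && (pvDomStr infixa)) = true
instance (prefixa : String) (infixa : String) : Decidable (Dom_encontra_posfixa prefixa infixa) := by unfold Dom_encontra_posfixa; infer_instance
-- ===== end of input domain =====

-- B replaces A's recursion by an explicit stack emitting reverse-postorder, reversed once at the end (alternative decomposition, same cost).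

-- ===== PORT A =====
-- termination helper (cited by both ports' decreasing_by): the two prefix slices of a
-- nonempty prefix have lengths summing to at most pre.length - 1 (so each is strictly shorter)
theorem pvSliceLen_le (pre : List Char) (t : Int) (ht : 0 ≤ t) (hne : pre ≠ []) :
    (PySem.List.slice pre (some 1) (some (t + 1))).length
      + (PySem.List.slice pre (some (t + 1)) none).length ≤ pre.length - 1 ∧ 0 < pre.length := by
  have h1 := PySem.List.slice_toNat pre (a := 1) (b := t + 1) (by omega) (by omega)
  have h2 := PySem.List.slice_from pre (a := t + 1) (by omega)
  have hp : 0 < pre.length := List.length_pos_iff.mpr hne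
  have hk : 0 < (t + 1).toNat := by omega
  constructor
  · rw [h1, h2]; simp [List.length_take, List.length_drop]; omega
  · exact hp

-- literal transliteration of A (on char lists; String wrapper below)
def pvPostA (pre ino : List Char) : List Char :=
  match hpre : pre with
  | [] => []
  | raiz :: resto =>
    let indice_raiz := PySem.Chars.find ino [raiz]
    let in_esquerda := PySem.List.slice ino none (some indice_raiz)
    let in_direita := PySem.List.slice ino (some (indice_raiz + 1)) none
    let tam_esq : Int := in_esquerda.length
    let pre_esquerda := PySem.List.slice pre (some 1) (some (tam_esq + 1))
    let pre_direita := PySem.List.slice pre (some (tam_esq + 1)) none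
    pvPostA pre_esquerda in_esquerda ++ pvPostA pre_direita in_direita ++ [raiz]
termination_by pre.length
decreasing_by
  · subst hpre
    have h := pvSliceLen_le (raiz :: resto) ((PySem.List.slice ino none (some (PySem.Chars.find ino [raiz]))).length : Int) (by omega) (by simp)
    simp only [List.length_cons] at h ⊢; omega
  · subst hpre
    have h := pvSliceLen_le (raiz :: resto) ((PySem.List.slice ino none (some (PySem.Chars.find ino [raiz]))).length : Int) (by omega) (by simp)
    simp only [List.length_cons] at h ⊢; omega

def encontra_posfixa (prefixa : String) (infixa : String) : String :=
  String.ofList (pvPostA prefixa.toList infixa.toList)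

-- ===== PORT B =====
-- literal transliteration of Source B's while-loop; the Python list used as a stack is
-- represented head-first (cons = append, head = pop): the same stack discipline.
def pvLoopB (stack : List (List Char × List Char)) (out : List Char) : List Char :=
  match stack with
  | [] => out
  | (pre, ino) :: rest =>
    match hpre : pre with
    | [] => pvLoopB rest out
    | raiz :: resto =>
      let i := PySem.Chars.find ino [raiz]
      let in_esq := PySem.List.slice ino none (some i)
      let in_dir := PySem.List.slice ino (some (i + 1)) none
      let t : Int := in_esq.length
      pvLoopB ((PySem.List.slice pre (some (t + 1)) none, in_dir) ::
               (PySem.List.slice pre (some 1) (some (t + 1)), in_esq) :: rest)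
        (out ++ [raiz])
termination_by (stack.map (fun p => 2 * p.1.length + 1)).sum
decreasing_by
  · simp
  · subst hpre
    have h := pvSliceLen_le (raiz :: resto) ((PySem.List.slice ino none (some (PySem.Chars.find ino [raiz]))).length : Int) (by omega) (by simp)
    simp only [List.length_cons] at h ⊢
    simp; omega

def encontra_posfixa_alt (prefixa : String) (infixa : String) : String :=
  String.ofList ((pvLoopB [(prefixa.toList, infixa.toList)] []).reverse)

-- ===== PRECONDITION & SPEC =====
def Spec_encontra_posfixa (prefixa : String) (infixa : String) (out : String) : Prop := out = encontra_posfixa_alt prefixa infixa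
instance (prefixa : String) (infixa : String) (out : String) : Decidable (Spec_encontra_posfixa prefixa infixa out) := by unfold Spec_encontra_posfixa; infer_instance

-- ===== CLAIM (what is proved, stated in full; the proofs are below) =====
def Claim_equal_encontra_posfixa : Prop := ∀ (prefixa : String) (infixa : String), Dom_encontra_posfixa prefixa infixa → Spec_encontra_posfixa prefixa infixa (encontra_posfixa prefixa infixa)

-- ===== LEMMAS AND PROOFS =====
-- stack invariant: the loop appends, after out, the reversed A-postfix of each stacked pair in pop order
-- one-step unfolding of A's recursion at a nonempty prefix, lets expanded
theorem pvPostA_cons (raiz : Char) (tl ino : List Char) :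
    pvPostA (raiz :: tl) ino =
      pvPostA (PySem.List.slice (raiz :: tl) (some 1)
          (some (((PySem.List.slice ino none (some (PySem.Chars.find ino [raiz]))).length : Int) + 1)))
        (PySem.List.slice ino none (some (PySem.Chars.find ino [raiz])))
      ++ pvPostA (PySem.List.slice (raiz :: tl)
          (some (((PySem.List.slice ino none (some (PySem.Chars.find ino [raiz]))).length : Int) + 1)) none)
        (PySem.List.slice ino (some (PySem.Chars.find ino [raiz] + 1)) none)
      ++ [raiz] := by
  rw [pvPostA.eq_def]

theorem pvLoopB_eq (stack : List (List Char × List Char)) (out : List Char) :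
    pvLoopB stack out = out ++ (stack.map (fun p => (pvPostA p.1 p.2).reverse)).flatten := by
  induction stack, out using pvLoopB.induct with
  | case1 out => simp [pvLoopB]
  | case2 out ino rest ih =>
      rw [pvLoopB]; rw [ih]; simp [pvPostA]
  | case3 out ino rest raiz tl i in_esq in_dir t ih =>
      rw [pvLoopB, ih]
      simp [pvPostA_cons]
      rfl

-- ===== VERDICT (by name: the statement is the Claim_ definition above) =====
theorem encontra_posfixa_spec : Claim_equal_encontra_posfixa := by
  intro prefixa infixa _
  unfold Spec_encontra_posfixa encontra_posfixa encontra_posfixa_alt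
  rw [pvLoopB_eq]
  simp
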